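-- pv_equiv track=rewrite | github.com/vdrey/Project-Euler | Python/Archive/Problem 5/5v2.py | factorCheck
-- ===== SOURCE A (Python) =====
-- def factorCheck(num):
--
--     indexCheck = 0
--     factorList = [11,12,13,14,15,16,17,18,19,20]
--     score = 0
--
--     for term in factorList:
--
--         if num % term == 0:
--             score = score + 1
--
--         else:
--             break
--
--     if score == (indexCheck + 1):
--         indexCheck = indexCheck + 1
--         return True
--
--     else:
--         return False
-- ===== SOURCE B (Python) =====
-- def factorCheck(num):
--     return num % 11 == 0 and num % 12 != 0
-- ===== Notes on version B (the rewrite author's own statement) =====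
-- stated objective: simpler
-- what changed: Replaced the consecutive-divisibility counting loop with the closed-form test num % 11 == 0 and num % 12 != 0, which is exactly when the loop's score equals 1.
import Mathlib
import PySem

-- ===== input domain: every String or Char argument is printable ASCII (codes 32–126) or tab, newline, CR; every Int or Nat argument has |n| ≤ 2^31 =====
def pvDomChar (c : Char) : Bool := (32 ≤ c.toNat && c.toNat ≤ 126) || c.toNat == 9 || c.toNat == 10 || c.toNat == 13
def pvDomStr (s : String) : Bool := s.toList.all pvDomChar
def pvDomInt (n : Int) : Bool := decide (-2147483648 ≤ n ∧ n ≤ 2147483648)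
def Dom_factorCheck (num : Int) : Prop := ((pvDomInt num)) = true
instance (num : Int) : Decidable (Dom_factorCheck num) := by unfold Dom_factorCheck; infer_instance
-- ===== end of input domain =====

-- ===== PORT A =====
-- B replaces the counting loop by the closed-form test num % 11 == 0 && num % 12 != 0 (simpler).
-- loop over factorList accumulating score, stopping at the first non-divisor (the 'break')
def factorCheckLoop (num : Int) : List Int → Int → Int
  | [], score => score
  | term :: rest, score =>
      if PySem.Int.mod num term = 0 then factorCheckLoop num rest (score + 1)
      else score

def factorCheck (num : Int) : Bool :=
  let indexCheck : Int := 0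
  let factorList : List Int := [11,12,13,14,15,16,17,18,19,20]
  let score := factorCheckLoop num factorList 0
  if score = indexCheck + 1 then true else false

-- ===== PORT B =====
def factorCheck_alt (num : Int) : Bool :=
  PySem.Int.mod num 11 = 0 && PySem.Int.mod num 12 ≠ 0

-- ===== PRECONDITION & SPEC =====
def Spec_factorCheck (num : Int) (out : Bool) : Prop := out = factorCheck_alt num
instance (num : Int) (out : Bool) : Decidable (Spec_factorCheck num out) := by unfold Spec_factorCheck; infer_instance

-- ===== CLAIM (what is proved, stated in full; the proofs are below) =====
def Claim_equal_factorCheck : Prop := ∀ (num : Int), Dom_factorCheck num → Spec_factorCheck num (factorCheck num)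

-- ===== LEMMAS AND PROOFS =====

-- ===== VERDICT (by name: the statement is the Claim_ definition above) =====
lemma factorCheckLoop_ge (num : Int) : ∀ (l : List Int) (s : Int), s ≤ factorCheckLoop num l s := by
  intro l
  induction l with
  | nil => intro s; simp [factorCheckLoop]
  | cons t rest ih =>
      intro s
      unfold factorCheckLoop
      split
      · exact le_trans (by omega) (ih (s + 1))
      · exact le_refl s

theorem factorCheck_spec : Claim_equal_factorCheck := by
  intro num _
  unfold Spec_factorCheck factorCheck factorCheck_alt
  show (if factorCheckLoop num [11,12,13,14,15,16,17,18,19,20] 0 = 0 + 1 then true else false)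
      = (decide (PySem.Int.mod num 11 = 0) && decide (PySem.Int.mod num 12 ≠ 0))
  simp only [PySem.Int.mod_eq_zero_iff_dvd]
  by_cases h11 : (11 : Int) ∣ num
  · by_cases h12 : (12 : Int) ∣ num
    · rw [show factorCheckLoop num [11,12,13,14,15,16,17,18,19,20] 0
            = factorCheckLoop num [13,14,15,16,17,18,19,20] 2 from by
          rw [factorCheckLoop, if_pos ((PySem.Int.mod_eq_zero_iff_dvd num 11).mpr h11), factorCheckLoop, if_pos ((PySem.Int.mod_eq_zero_iff_dvd num 12).mpr h12)]; norm_num]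
      have h := factorCheckLoop_ge num [13,14,15,16,17,18,19,20] 2
      rw [if_neg (by omega)]
      simp [h11, h12]
    · rw [show factorCheckLoop num [11,12,13,14,15,16,17,18,19,20] 0 = 1 from by
          rw [factorCheckLoop, if_pos ((PySem.Int.mod_eq_zero_iff_dvd num 11).mpr h11), factorCheckLoop, if_neg (fun hc => h12 ((PySem.Int.mod_eq_zero_iff_dvd num 12).mp hc))]; norm_num]
      simp [h11, h12]
  · rw [show factorCheckLoop num [11,12,13,14,15,16,17,18,19,20] 0 = 0 from by
        rw [factorCheckLoop, if_neg (fun hc => h11 ((PySem.Int.mod_eq_zero_iff_dvd num 11).mp hc))]]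
    simp [h11]
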